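-- pv_equiv track=rewrite | github.com/HiperLunar/AmongUsSniffer | protocol.py | WritePackedUInt32
-- ===== SOURCE A (Python) =====
-- def WritePackedUInt32(x):
--     r = 0
--     while x > 0:
--         b = x & 255
--         if x >= 128:
--             b |= 128
--
--         r = (r << 8) + b
--         x >>= 7
--     return r
-- ===== SOURCE B (Python) =====
-- def WritePackedUInt32(x):
--     if x <= 0:
--         return 0
--     n = 1 + (x.bit_length() - 1) // 7
--     return sum(
--         (((x >> (7 * i)) & 0x7F) | (0x80 if i < n - 1 else 0)) << (8 * (n - 1 - i))
--         for i in range(n)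
--     )
-- ===== Notes on version B (the rewrite author's own statement) =====
-- stated objective: alternative
-- what changed: Replaced A's sequential shift-accumulate while-loop by a count-first decomposition: compute the byte count n = 1 + (bit_length-1)//7 in closed form, then build each of the n varint bytes independently by indexed shift/mask and sum them positionally.
import Mathlib
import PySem

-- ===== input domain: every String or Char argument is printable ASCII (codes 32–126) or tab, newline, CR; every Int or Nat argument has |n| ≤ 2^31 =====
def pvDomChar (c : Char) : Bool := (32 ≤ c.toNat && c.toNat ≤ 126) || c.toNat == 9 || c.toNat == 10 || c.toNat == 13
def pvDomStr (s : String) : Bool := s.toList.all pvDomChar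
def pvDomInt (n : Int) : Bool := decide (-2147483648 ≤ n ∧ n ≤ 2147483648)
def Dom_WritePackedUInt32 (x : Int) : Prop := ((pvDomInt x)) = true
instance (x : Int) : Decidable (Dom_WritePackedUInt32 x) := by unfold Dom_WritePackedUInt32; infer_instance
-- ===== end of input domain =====

-- B replaces A's sequential shift-accumulate loop by a count-first decomposition: a closed-form
-- group count from bit_length plus an independent positional assembly of each byte (objective:
-- alternative decomposition, same asymptotic cost).

-- ===== PORT A =====
-- literal port of A's while-loop: state (x, r); b = x & 255, continuation bit when x >= 128
def pvLoopA (x r : Int) : Int :=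
  if x > 0 then
    let b := PySem.Int.band x 255
    let b := if x ≥ 128 then PySem.Int.bor b 128 else b
    pvLoopA (x >>> (7:Nat)) ((r <<< (8:Nat)) + b)
  else r
termination_by x.toNat
decreasing_by simp [Int.shiftRight_eq_div_pow]; omega

def WritePackedUInt32 (x : Int) : Int := pvLoopA x 0

-- ===== PORT B =====
-- literal port of B: n = 1 + (x.bit_length()-1)//7, result = sum of independently built bytes
def WritePackedUInt32_alt (x : Int) : Int :=
  if x ≤ 0 then 0
  else
    let n : Nat := 1 + (PySem.Int.bitLength x - 1) / 7
    (List.range n).foldl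
      (fun (r : Int) (i : Nat) =>
        r + (PySem.Int.bor (PySem.Int.band (x >>> (7*i)) 127)
              (if i < n-1 then 128 else 0)) <<< (8*(n-1-i))) 0

-- ===== PRECONDITION & SPEC =====
def Spec_WritePackedUInt32 (x : Int) (out : Int) : Prop := out = WritePackedUInt32_alt x
instance (x : Int) (out : Int) : Decidable (Spec_WritePackedUInt32 x out) := by unfold Spec_WritePackedUInt32; infer_instance

-- ===== CLAIM (what is proved, stated in full; the proofs are below) =====
def Claim_equal_WritePackedUInt32 : Prop := ∀ (x : Int), Dom_WritePackedUInt32 x → Spec_WritePackedUInt32 x (WritePackedUInt32 x)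

-- ===== LEMMAS AND PROOFS =====

-- Nat model of A's loop
def natLoop (m r : Nat) : Nat :=
  if m = 0 then r
  else natLoop (m >>> 7) ((r <<< 8) + (if 128 ≤ m then (m &&& 255) ||| 128 else m &&& 255))
termination_by m
decreasing_by simp [Nat.shiftRight_eq_div_pow]; omega

-- group count as A's loop produces it
def gcA (m : Nat) : Nat := if m = 0 then 0 else gcA (m >>> 7) + 1
termination_by m
decreasing_by simp [Nat.shiftRight_eq_div_pow]; omega

-- B's group count and byte terms (Nat model)
def pvN (m : Nat) : Nat := 1 + (PySem.Int.bitLength (m:Int) - 1) / 7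

def pvT (m n i : Nat) : Nat :=
  (((m >>> (7*i)) &&& 127) ||| (if i < n-1 then 128 else 0)) <<< (8*(n-1-i))

def natB (m : Nat) : Nat := ((List.range (pvN m)).map (pvT m (pvN m))).sum

theorem bridgeA : ∀ (m r : Nat), pvLoopA (m:Int) (r:Int) = ((natLoop m r : Nat) : Int) := by
  intro m
  induction m using Nat.strong_induction_on with
  | _ m ih =>
    intro r
    rw [pvLoopA, natLoop]
    by_cases h : m = 0
    · simp [h]
    · have hm : 0 < m := Nat.pos_of_ne_zero h
      have hx : ((m:Int) > 0) := by exact_mod_cast hm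
      simp only [hx, if_true, h, if_false]
      have hsh : ((m:Int) >>> (7:Nat)) = ((m >>> 7 : Nat) : Int) := by
        simp [Int.shiftRight_eq_div_pow, Nat.shiftRight_eq_div_pow]
      have hshl : ((r:Int) <<< (8:Nat)) = ((r <<< 8 : Nat) : Int) := by
        simp [Int.shiftLeft_eq, Nat.shiftLeft_eq]
      have hband : PySem.Int.band (m:Int) 255 = ((m &&& 255 : Nat) : Int) := by
        have := PySem.Int.band_natCast m 255; simpa using this
      have hbor : PySem.Int.bor ((m &&& 255 : Nat) : Int) 128 = (((m &&& 255) ||| 128 : Nat) : Int) := by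
        have := PySem.Int.bor_natCast (m &&& 255) 128; simpa using this
      by_cases h128 : 128 ≤ m
      · have : ((m:Int) ≥ 128) := by exact_mod_cast h128
        simp only [hband, hbor, this, if_true, h128, hsh, hshl, ← Nat.cast_add]
        exact ih (m >>> 7) (by simp [Nat.shiftRight_eq_div_pow]; omega) _
      · have : ¬ ((m:Int) ≥ 128) := by exact_mod_cast h128
        simp only [hband, this, if_false, h128, hsh, hshl, ← Nat.cast_add]
        exact ih (m >>> 7) (by simp [Nat.shiftRight_eq_div_pow]; omega) _

theorem foldl_sum_cast (t : Nat → Nat) (l : List Nat) (a : Nat) :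
    l.foldl (fun r i => r + ((t i : Nat) : Int)) (a:Int) = ((a + (l.map t).sum : Nat) : Int) := by
  induction l generalizing a with
  | nil => simp
  | cons x xs ih =>
    simp only [List.foldl_cons, List.map_cons, List.sum_cons]
    rw [← Nat.cast_add, ih]
    push_cast; ring_nf

theorem bridgeB : ∀ (m : Nat), 0 < m → WritePackedUInt32_alt (m:Int) = ((natB m : Nat) : Int) := by
  intro m hm
  unfold WritePackedUInt32_alt
  have hns : ¬ ((m:Int) ≤ 0) := by exact_mod_cast Nat.not_le.mpr hm
  simp only [hns, if_false]
  have hfun : (fun (r:Int) (i:Nat) =>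
      r + (PySem.Int.bor (PySem.Int.band ((m:Int) >>> (7*i)) 127)
            (if i < (1 + (PySem.Int.bitLength (m:Int) - 1) / 7)-1 then 128 else 0)) <<< (8*((1 + (PySem.Int.bitLength (m:Int) - 1) / 7)-1-i)))
      = fun (r:Int) (i:Nat) => r + ((pvT m (pvN m) i : Nat) : Int) := by
    funext r i
    congr 1
    have hsh : ((m:Int) >>> (7*i)) = ((m >>> (7*i) : Nat) : Int) := by
      simp [Int.shiftRight_eq_div_pow, Nat.shiftRight_eq_div_pow]
    rw [hsh]
    have hband : PySem.Int.band ((m >>> (7*i) : Nat) : Int) 127 = (((m >>> (7*i)) &&& 127 : Nat) : Int) := by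
      have := PySem.Int.band_natCast (m >>> (7*i)) 127; simpa using this
    rw [hband]
    have hif : ((if i < (1 + (PySem.Int.bitLength (m:Int) - 1) / 7)-1 then (128:Int) else 0))
        = (((if i < pvN m - 1 then (128:Nat) else 0) : Nat) : Int) := by
      unfold pvN; split_ifs <;> simp
    rw [hif]
    have hbor := PySem.Int.bor_natCast ((m >>> (7*i)) &&& 127) (if i < pvN m - 1 then (128:Nat) else 0)
    rw [hbor]
    have hshl : ∀ (a : Nat) (k : Nat), ((a:Int) <<< k) = ((a <<< k : Nat) : Int) := by
      intro a k; simp [Int.shiftLeft_eq, Nat.shiftLeft_eq]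
    rw [hshl]
    unfold pvT pvN
    norm_num
  rw [hfun]
  have : ((0:Int)) = ((0:Nat):Int) := rfl
  rw [this, foldl_sum_cast (pvT m (pvN m)) (List.range (1 + (PySem.Int.bitLength (m:Int) - 1) / 7)) 0]
  unfold natB pvN
  norm_num

theorem bl_pos (m : Nat) (h : 0 < m) : 1 ≤ PySem.Int.bitLength (m:Int) := by
  rw [PySem.Int.bitLength_natCast h]; omega

theorem bl_small (m : Nat) (h1 : 0 < m) (h2 : m < 128) : PySem.Int.bitLength (m:Int) ≤ 7 := by
  by_contra hc
  have h := PySem.Int.two_pow_bitLength_le (m:Int) (by exact_mod_cast h1.ne')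
  simp at h
  have : 2^7 ≤ 2 ^ (PySem.Int.bitLength (m:Int) - 1) := Nat.pow_le_pow_right (by norm_num) (by omega)
  omega

theorem bl7 (m : Nat) (h : 128 ≤ m) :
    PySem.Int.bitLength (m:Int) = PySem.Int.bitLength ((m/128 : Nat) : Int) + 7 := by
  rw [PySem.Int.bitLength_natCast (by omega),
      PySem.Int.bitLength_natCast (by omega : 0 < m/2),
      PySem.Int.bitLength_natCast (by omega : 0 < m/2/2),
      PySem.Int.bitLength_natCast (by omega : 0 < m/2/2/2),
      PySem.Int.bitLength_natCast (by omega : 0 < m/2/2/2/2),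
      PySem.Int.bitLength_natCast (by omega : 0 < m/2/2/2/2/2),
      PySem.Int.bitLength_natCast (by omega : 0 < m/2/2/2/2/2/2)]
  norm_num [Nat.div_div_eq_div_mul]

theorem pvN_step (m : Nat) (h : 128 ≤ m) : pvN m = pvN (m >>> 7) + 1 := by
  have hsh : m >>> 7 = m / 128 := by simp [Nat.shiftRight_eq_div_pow]
  have h1 : 0 < m / 128 := by omega
  have := bl7 m h
  have hb := bl_pos (m/128) h1
  unfold pvN
  rw [hsh, this]
  omega

theorem pvN_small (m : Nat) (h1 : 0 < m) (h2 : m < 128) : pvN m = 1 := by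
  have := bl_pos m h1
  have := bl_small m h1 h2
  unfold pvN
  omega

theorem pvN_pos (m : Nat) : 1 ≤ pvN m := by unfold pvN; omega

theorem gcA_eq_pvN : ∀ (m : Nat), 0 < m → gcA m = pvN m := by
  intro m
  induction m using Nat.strong_induction_on with
  | _ m ih =>
    intro hm
    rw [gcA, if_neg hm.ne']
    by_cases h : 128 ≤ m
    · have hsh : m >>> 7 = m / 128 := by simp [Nat.shiftRight_eq_div_pow]
      rw [ih (m >>> 7) (by omega) (by omega), pvN_step m h]
    · have hz : m >>> 7 = 0 := by simp [Nat.shiftRight_eq_div_pow]; omega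
      rw [hz, pvN_small m hm (by omega)]
      simp [gcA]

theorem natLoop_acc : ∀ (m r : Nat), natLoop m r = r * 256 ^ gcA m + natLoop m 0 := by
  intro m
  induction m using Nat.strong_induction_on with
  | _ m ih =>
    intro r
    by_cases h : m = 0
    · simp [h, natLoop, gcA]
    · have hlt : m >>> 7 < m := by simp [Nat.shiftRight_eq_div_pow]; omega
      rw [natLoop]; simp only [h, if_false]
      rw [ih _ hlt]
      conv_rhs => rw [gcA, if_neg h, natLoop, if_neg h]
      rw [ih _ hlt (0 <<< 8 + _)]
      simp only [Nat.shiftLeft_eq, pow_succ]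
      ring

theorem byte_or (m : Nat) : (m &&& 255) ||| 128 = (m &&& 127) ||| 128 := by
  apply Nat.eq_of_testBit_eq
  intro j
  have h255 : (255:Nat) = 2^8 - 1 := by norm_num
  have h127 : (127:Nat) = 2^7 - 1 := by norm_num
  have h128 : (128:Nat) = 2^7 := by norm_num
  simp only [Nat.testBit_or, Nat.testBit_and, h255, h127, h128,
    Nat.testBit_two_pow_sub_one, Nat.testBit_two_pow]
  by_cases h : 7 = j
  · simp [h]
  · simp only [h, decide_false, Bool.or_false]
    congr 1
    simp only [decide_eq_decide]
    omega

theorem main_nat : ∀ (m : Nat), natLoop m 0 = natB m := by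
  intro m
  induction m using Nat.strong_induction_on with
  | _ m ih =>
    by_cases h0 : m = 0
    · subst h0
      rw [natLoop, if_pos rfl]
      decide
    by_cases h128 : 128 ≤ m
    · -- at least two bytes: peel off the low 7-bit group on both sides
      have hlt : m >>> 7 < m := by simp [Nat.shiftRight_eq_div_pow]; omega
      have hm' : 0 < m >>> 7 := by simp [Nat.shiftRight_eq_div_pow]; omega
      have hn' : 1 ≤ pvN (m >>> 7) := pvN_pos _
      rw [natLoop, if_neg h0, if_pos h128, natLoop_acc, gcA_eq_pvN _ hm']
      conv_rhs => rw [natB]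
      rw [pvN_step m h128, List.range_succ_eq_map, List.map_cons, List.sum_cons,
          List.map_map]
      have htail : (List.map (pvT m (pvN (m >>> 7) + 1) ∘ Nat.succ) (List.range (pvN (m >>> 7)))
          : List Nat) = List.map (pvT (m >>> 7) (pvN (m >>> 7))) (List.range (pvN (m >>> 7))) := by
        apply List.map_congr_left
        intro i hi
        simp only [Function.comp_apply, pvT, Nat.succ_eq_add_one]
        have e1 : m >>> (7*(i+1)) = (m >>> 7) >>> (7*i) := by
          rw [← Nat.shiftRight_add]; ring_nf
        simp only [Nat.add_sub_cancel, e1]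
        have e2 : (i+1 < pvN (m >>> 7)) ↔ (i < pvN (m >>> 7) - 1) := by omega
        have e3 : pvN (m >>> 7) - (i+1) = pvN (m >>> 7) - 1 - i := by omega
        rw [if_congr e2 rfl rfl, e3]
      rw [htail]
      have hhead : pvT m (pvN (m >>> 7) + 1) 0 = ((m &&& 127) ||| 128) * 256 ^ pvN (m >>> 7) := by
        unfold pvT
        have : (0 < pvN (m >>> 7) + 1 - 1) := by omega
        rw [if_pos this]
        simp only [Nat.mul_zero, Nat.shiftRight_zero, Nat.shiftLeft_eq]
        rw [show (2:Nat)^(8 * (pvN (m >>> 7) + 1 - 1 - 0)) = 256 ^ pvN (m >>> 7) by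
          rw [pow_mul]; norm_num]
      rw [hhead, ← natB, byte_or, ih _ hlt]
      simp [Nat.shiftLeft_eq]
    · -- single byte
      have hz : m >>> 7 = 0 := by simp [Nat.shiftRight_eq_div_pow]; omega
      rw [natLoop, if_neg h0, if_neg h128, hz, natLoop, if_pos rfl]
      rw [natB, pvN_small m (by omega) (by omega)]
      simp only [List.range_one, List.map_cons, List.map_nil, List.sum_cons, List.sum_nil]
      unfold pvT
      have hand255 : m &&& 255 = m := by
        rw [show (255:Nat) = 2^8-1 by norm_num, Nat.and_two_pow_sub_one_eq_mod]
        omega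
      have hand127 : m &&& 127 = m := by
        rw [show (127:Nat) = 2^7-1 by norm_num, Nat.and_two_pow_sub_one_eq_mod]
        omega
      simp [hand255, hand127, Nat.shiftLeft_eq]

-- ===== VERDICT (by name: the statement is the Claim_ definition above) =====
theorem WritePackedUInt32_spec : Claim_equal_WritePackedUInt32 := by
  intro x _
  unfold Spec_WritePackedUInt32 WritePackedUInt32
  by_cases h : x ≤ 0
  · rw [pvLoopA, if_neg (by omega), WritePackedUInt32_alt, if_pos h]
  · have hx : 0 < x := by omega
    have hrepr : x = ((x.toNat : Nat) : Int) := by omega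
    rw [hrepr]
    have h0 : ((0:Int)) = ((0:Nat):Int) := rfl
    rw [h0, bridgeA x.toNat 0, bridgeB x.toNat (by omega), main_nat]
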